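-- pv_equiv track=rewrite | github.com/INK-USC/STIM | src/gen_eval/formula/utils.py | cut_at_stop_sequence
-- ===== SOURCE A (Python) =====
-- from typing import List
--
-- def cut_at_stop_sequence(text: str, stop_sequences: List[str]) -> str:
--     # Cut the text at the first occurrence of any  stop sequence
--     smallest_idx = len(text)
--     for stop_sequence in stop_sequences:
--         if len(stop_sequence) == 0:  # Skip empty stop sequences
--             continue
--         idx = text.find(stop_sequence)
--         if idx != -1 and idx < smallest_idx:
--             smallest_idx = idx
--     return text[:smallest_idx]
-- ===== SOURCE B (Python) =====
-- def cut_at_stop_sequence(text, stop_sequences):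
--     # Single left-to-right scan: return the prefix before the first position
--     # where any non-empty stop sequence starts.
--     seqs = [s for s in stop_sequences if s]
--     if not seqs:
--         return text
--     for i in range(len(text)):
--         for s in seqs:
--             if text.startswith(s, i):
--                 return text[:i]
--     return text
-- ===== Notes on version B (the rewrite author's own statement) =====
-- stated objective: faster
-- what changed: Replaces N independent full str.find scans plus a manual running minimum with one left-to-right scan over positions that early-exits at the first position where any non-empty stop sequence starts.
import Mathlib
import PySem

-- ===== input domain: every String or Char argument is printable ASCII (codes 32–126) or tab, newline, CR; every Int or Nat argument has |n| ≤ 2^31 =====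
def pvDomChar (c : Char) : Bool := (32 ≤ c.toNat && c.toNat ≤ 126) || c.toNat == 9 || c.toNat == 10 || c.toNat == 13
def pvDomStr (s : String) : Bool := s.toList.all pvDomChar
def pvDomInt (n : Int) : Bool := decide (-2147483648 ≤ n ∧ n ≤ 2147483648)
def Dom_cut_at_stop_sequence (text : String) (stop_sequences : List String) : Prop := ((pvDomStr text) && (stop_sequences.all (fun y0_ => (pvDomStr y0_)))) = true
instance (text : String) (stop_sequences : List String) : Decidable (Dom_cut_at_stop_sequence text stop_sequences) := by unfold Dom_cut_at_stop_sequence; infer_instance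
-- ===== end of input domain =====

-- B replaces A's N independent str.find scans + manual running minimum by one
-- left-to-right scan that stops at the first position where any non-empty stop
-- sequence starts (objective: alternative algorithm, same result).

-- ===== PORT A =====
def cut_at_stop_sequence (text : String) (stop_sequences : List String) : String :=
  let smallest_idx : Int :=
    stop_sequences.foldl
      (fun smallest_idx stop_sequence =>
        if PySem.Str.len stop_sequence = 0 then smallest_idx
        else
          let idx := PySem.Str.find text stop_sequence
          if idx ≠ -1 ∧ idx < smallest_idx then idx else smallest_idx)
      (PySem.Str.len text)
  PySem.Str.slice text none (some smallest_idx)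

-- ===== PORT B =====
-- the 'for i in range(len(text))' loop of Source B: i is the position, rest = text[i:]
def pvCutGo (seqs : List (List Char)) (full : List Char) (i : Nat) (rest : List Char) : List Char :=
  match rest with
  | [] => full
  | _ :: tl =>
    if seqs.any (fun s => PySem.Chars.startswith rest s) then full.take i
    else pvCutGo seqs full (i + 1) tl

def cut_at_stop_sequence_alt (text : String) (stop_sequences : List String) : String :=
  let seqs := (stop_sequences.filter (fun s => s ≠ "")).map String.toList
  if seqs.isEmpty then text
  else String.ofList (pvCutGo seqs text.toList 0 text.toList)

-- ===== PRECONDITION & SPEC =====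
def Spec_cut_at_stop_sequence (text : String) (stop_sequences : List String) (out : String) : Prop := out = cut_at_stop_sequence_alt text stop_sequences
instance (text : String) (stop_sequences : List String) (out : String) : Decidable (Spec_cut_at_stop_sequence text stop_sequences out) := by unfold Spec_cut_at_stop_sequence; infer_instance

-- ===== CLAIM (what is proved, stated in full; the proofs are below) =====
def Claim_equal_cut_at_stop_sequence : Prop := ∀ (text : String) (stop_sequences : List String), Dom_cut_at_stop_sequence text stop_sequences → Spec_cut_at_stop_sequence text stop_sequences (cut_at_stop_sequence text stop_sequences)

-- ===== LEMMAS AND PROOFS =====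

-- 'some non-empty stop sequence starts at position i'
def pvHit (seqs : List (List Char)) (cs : List Char) (i : Nat) : Bool :=
  seqs.any (fun s => PySem.Chars.startswith (cs.drop i) s)

lemma pv_drop_succ {cs tl : List Char} {a : Char} {j : Nat} (h : cs.drop j = a :: tl) :
    cs.drop (j + 1) = tl := by
  have h1 : cs.drop (j + 1) = (cs.drop j).drop 1 := by rw [List.drop_drop]
  rw [h1, h]; rfl

lemma pv_drop_lt {cs tl : List Char} {a : Char} {j : Nat} (h : cs.drop j = a :: tl) :
    j < cs.length := by
  have h1 : (cs.drop j).length = cs.length - j := List.length_drop ..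
  rw [h] at h1
  simp at h1
  omega

lemma pvCutGo_none (seqs : List (List Char)) (cs : List Char)
    (hall : ∀ i, pvHit seqs cs i = false) :
    ∀ n j, cs.length - j ≤ n → pvCutGo seqs cs j (cs.drop j) = cs := by
  intro n
  induction n with
  | zero =>
    intro j hj
    rw [List.drop_eq_nil_of_le (by omega)]
    rfl
  | succ n ih =>
    intro j hj
    cases h : cs.drop j with
    | nil => rfl
    | cons a tl =>
      have hc : (seqs.any (fun s => PySem.Chars.startswith (a :: tl) s)) = false := by
        have := hall j; rwa [pvHit, h] at this
      simp only [pvCutGo, hc, Bool.false_eq_true, if_false]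
      have htl : tl = cs.drop (j + 1) := (pv_drop_succ h).symm
      rw [htl]
      exact ih (j + 1) (by have := pv_drop_lt h; omega)

lemma pvCutGo_hit (seqs : List (List Char)) (cs : List Char) (k : Nat)
    (hk : pvHit seqs cs k = true) (hkL : k < cs.length)
    (hmin : ∀ i, i < k → pvHit seqs cs i = false) :
    ∀ n j, j ≤ k → cs.length - j ≤ n → pvCutGo seqs cs j (cs.drop j) = cs.take k := by
  intro n
  induction n with
  | zero => intro j hjk hj; omega
  | succ n ih =>
    intro j hjk hj
    cases h : cs.drop j with
    | nil =>
      have h1 : (cs.drop j).length = cs.length - j := List.length_drop ..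
      rw [h] at h1
      simp at h1
      omega
    | cons a tl =>
      by_cases hjeq : j = k
      · have hc : (seqs.any (fun s => PySem.Chars.startswith (a :: tl) s)) = true := by
          have h2 := hk; rw [pvHit] at h2; rw [← hjeq] at h2; rwa [h] at h2
        simp only [pvCutGo, hc, if_true, hjeq]
      · have hc : (seqs.any (fun s => PySem.Chars.startswith (a :: tl) s)) = false := by
          have := hmin j (by omega); rwa [pvHit, h] at this
        simp only [pvCutGo, hc, Bool.false_eq_true, if_false]
        have htl : tl = cs.drop (j + 1) := (pv_drop_succ h).symm
        rw [htl]
        exact ih (j + 1) (by omega) (by have := pv_drop_lt h; omega)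

-- properties of A's fold: it computes the minimum of the successful finds, capped at the init
lemma pvFoldA_props (text : String) (f : Int → String → Int)
    (hf : ∀ a ss, f a ss = if PySem.Str.len ss = 0 then a
      else if PySem.Str.find text ss ≠ -1 ∧ PySem.Str.find text ss < a then PySem.Str.find text ss else a)
    (l : List String) : ∀ a : Int,
    (l.foldl f a = a ∨ ∃ ss ∈ l, PySem.Str.len ss ≠ 0 ∧ PySem.Str.find text ss ≠ -1 ∧
        PySem.Str.find text ss = l.foldl f a)
    ∧ l.foldl f a ≤ a
    ∧ ∀ ss ∈ l, PySem.Str.len ss ≠ 0 → PySem.Str.find text ss ≠ -1 →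
        l.foldl f a ≤ PySem.Str.find text ss := by
  induction l with
  | nil => intro a; exact ⟨Or.inl rfl, le_refl a, by simp⟩
  | cons ss t ih =>
    intro a
    simp only [List.foldl_cons]
    obtain ⟨ih1, ih2, ih3⟩ := ih (f a ss)
    have ha'le : f a ss ≤ a := by
      rw [hf]; split_ifs with h1 h2
      · exact le_refl a
      · exact le_of_lt h2.2
      · exact le_refl a
    refine ⟨?_, le_trans ih2 ha'le, ?_⟩
    · rcases ih1 with h | ⟨ss1, hm, hl, hfne, he⟩
      · rw [h, hf]
        split_ifs with h1 h2
        · exact Or.inl rfl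
        · exact Or.inr ⟨ss, List.mem_cons_self, h1, h2.1, rfl⟩
        · exact Or.inl rfl
      · exact Or.inr ⟨ss1, List.mem_cons_of_mem _ hm, hl, hfne, he⟩
    · intro ss1 hm hl hfne
      rcases List.mem_cons.mp hm with h | h
      · subst h
        by_cases h2 : PySem.Str.find text ss1 < a
        · have he : f a ss1 = PySem.Str.find text ss1 := by
            rw [hf]
            split_ifs with hz hc
            · exact absurd hz hl
            · rfl
            · exact absurd ⟨hfne, h2⟩ hc
          rw [← he]; exact ih2
        · push Not at h2
          exact le_trans (le_trans ih2 ha'le) h2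
      · exact ih3 ss1 h hl hfne

-- pvHit true ↔ some non-empty stop sequence is a prefix of cs.drop i
lemma pvHit_iff (stop_sequences : List String) (cs : List Char) (i : Nat) :
    pvHit ((stop_sequences.filter (fun s => s ≠ "")).map String.toList) cs i = true ↔
      ∃ ss ∈ stop_sequences, ss ≠ "" ∧ ss.toList <+: cs.drop i := by
  simp only [pvHit, List.any_eq_true, List.mem_map, List.mem_filter,
    PySem.Chars.startswith_iff, decide_eq_true_eq]
  constructor
  · rintro ⟨s, ⟨ss, ⟨hm, hne⟩, rfl⟩, hp⟩
    exact ⟨ss, hm, hne, hp⟩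
  · rintro ⟨ss, hm, hne, hp⟩
    exact ⟨ss.toList, ⟨ss, ⟨hm, hne⟩, rfl⟩, hp⟩

lemma pv_len_ne_zero_iff (ss : String) : PySem.Str.len ss ≠ 0 ↔ ss ≠ "" := by
  constructor
  · intro h hc; subst hc; exact h rfl
  · intro h hc
    apply h
    rw [← String.toList_inj]
    have h1 : ss.toList.length = 0 := by
      simp [PySem.Str.len] at hc ⊢
      omega
    simpa using List.length_eq_zero_iff.mp h1

-- ===== VERDICT (by name: the statement is the Claim_ definition above) =====
lemma pv_toList_ne_nil {ss : String} (h : ss ≠ "") : ss.toList ≠ [] := by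
  intro hc
  apply h
  rw [← String.toList_inj, hc]
  rfl

-- main equivalence
theorem cut_at_stop_sequence_spec : Claim_equal_cut_at_stop_sequence := by
  intro text stop_sequences _
  unfold Spec_cut_at_stop_sequence cut_at_stop_sequence cut_at_stop_sequence_alt
  simp only []
  refine String.toList_inj.mp ?_
  rw [PySem.Str.toList_slice, PySem.Chars.slice_eq_listSlice]
  set cs := text.toList with hcs
  set seqs := (stop_sequences.filter (fun s => s ≠ "")).map String.toList with hseqs
  have hlen : PySem.Str.len text = (cs.length : Int) := by simp [PySem.Str.len, hcs]
  obtain ⟨hd, hub, hlb⟩ := pvFoldA_props text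
    (fun smallest_idx stop_sequence =>
      if PySem.Str.len stop_sequence = 0 then smallest_idx
      else
        let idx := PySem.Str.find text stop_sequence
        if idx ≠ -1 ∧ idx < smallest_idx then idx else smallest_idx)
    (fun a ss => rfl) stop_sequences (PySem.Str.len text)
  set r := stop_sequences.foldl
      (fun smallest_idx stop_sequence =>
        if PySem.Str.len stop_sequence = 0 then smallest_idx
        else
          let idx := PySem.Str.find text stop_sequence
          if idx ≠ -1 ∧ idx < smallest_idx then idx else smallest_idx)
      (PySem.Str.len text) with hr
  -- a successful find at ss yields a hit, and vice versa
  have hfind_hit : ∀ ss ∈ stop_sequences, PySem.Str.len ss ≠ 0 → PySem.Str.find text ss ≠ -1 →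
      pvHit seqs cs (PySem.Str.find text ss).toNat = true := by
    intro ss hm hl hne
    have h0 : (0 : Int) ≤ PySem.Str.find text ss := by
      have := PySem.Chars.neg_one_le_find text.toList ss.toList
      rw [PySem.Str.find_eq] at hne ⊢
      omega
    rw [PySem.Str.find_eq] at h0
    obtain ⟨hp, _⟩ := PySem.Chars.find_spec h0
    rw [hseqs, pvHit_iff]
    exact ⟨ss, hm, (pv_len_ne_zero_iff ss).mp hl, by rw [PySem.Str.find_eq]; exact hp⟩
  by_cases hex : ∃ i, pvHit seqs cs i = true
  · -- some non-empty stop sequence occurs: both sides cut at the first position k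
    classical
    obtain ⟨ss0, hm0, hne0, hp0⟩ := (pvHit_iff stop_sequences cs (Nat.find hex)).mp
      (by rw [← hseqs]; exact Nat.find_spec hex)
    have hmin : ∀ i, i < Nat.find hex → pvHit seqs cs i = false := by
      intro i hi
      have := Nat.find_min hex hi
      simpa using this
    have hkL : Nat.find hex < cs.length := by
      have h1 := hp0.length_le
      have h2 : 0 < ss0.toList.length := List.length_pos_iff.mpr (pv_toList_ne_nil hne0)
      rw [List.length_drop] at h1
      omega
    -- the find of ss0 is exactly the first hit position
    have hf0 : PySem.Str.find text ss0 = (Nat.find hex : Int) := by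
      rw [PySem.Str.find_eq]
      have h0 : (0 : Int) ≤ PySem.Chars.find text.toList ss0.toList := by
        rw [PySem.Chars.find_nonneg_iff]
        exact List.IsInfix.trans hp0.isInfix (List.drop_suffix _ _).isInfix
      obtain ⟨hp, hminf⟩ := PySem.Chars.find_spec h0
      have hne : PySem.Str.find text ss0 ≠ -1 := by rw [PySem.Str.find_eq]; omega
      have hhit := hfind_hit ss0 hm0 ((pv_len_ne_zero_iff ss0).mpr hne0) hne
      have hk_le : Nat.find hex ≤ (PySem.Str.find text ss0).toNat := Nat.find_min' hex hhit
      rw [PySem.Str.find_eq] at hk_le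
      have hle_k : (PySem.Chars.find text.toList ss0.toList).toNat ≤ Nat.find hex := by
        by_contra hc
        exact hminf (Nat.find hex) (by omega) hp0
      omega
    -- A's fold result is exactly k
    have hrk : r = (Nat.find hex : Int) := by
      have hub_k : r ≤ (Nat.find hex : Int) := by
        rw [← hf0]
        exact hlb ss0 hm0 ((pv_len_ne_zero_iff ss0).mpr hne0) (by rw [hf0]; omega)
      rcases hd with h | ⟨ss1, hm1, hl1, hne1, he1⟩
      · rw [hlen] at h; omega
      · have h0 : (0 : Int) ≤ PySem.Str.find text ss1 := by
          have := PySem.Chars.neg_one_le_find text.toList ss1.toList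
          rw [PySem.Str.find_eq] at hne1 ⊢
          omega
        have hhit := hfind_hit ss1 hm1 hl1 hne1
        have hk := Nat.find_min' hex hhit
        omega
    rw [hrk, PySem.List.slice_to cs (b := (Nat.find hex : Int)) (by omega)]
    have hemp : seqs.isEmpty = false := by
      rcases (pvHit_iff stop_sequences cs (Nat.find hex)).mpr ⟨ss0, hm0, hne0, hp0⟩ with h
      rw [← hseqs] at h
      rcases List.any_eq_true.mp (by rw [pvHit] at h; exact h) with ⟨s, hs, _⟩
      rw [Bool.eq_false_iff]
      intro hie
      rw [List.isEmpty_iff] at hie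
      rw [hie] at hs
      exact absurd hs (List.not_mem_nil)
    rw [hemp]
    simp only [Bool.false_eq_true, if_false, String.toList_ofList]
    have := pvCutGo_hit seqs cs (Nat.find hex) (Nat.find_spec hex) hkL hmin cs.length 0
      (by omega) (by omega)
    rw [List.drop_zero] at this
    rw [this]
    simp
  · -- no non-empty stop sequence occurs: both sides return the text unchanged
    push Not at hex
    have hall : ∀ i, pvHit seqs cs i = false := by
      intro i
      have := hex i
      simpa using this
    have hnf : ∀ ss ∈ stop_sequences, PySem.Str.len ss ≠ 0 → PySem.Str.find text ss = -1 := by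
      intro ss hm hl
      by_contra hne
      have hhit := hfind_hit ss hm hl hne
      rw [hall _] at hhit
      exact Bool.false_ne_true hhit
    have hrL : r = (cs.length : Int) := by
      rcases hd with h | ⟨ss1, hm1, hl1, hne1, _⟩
      · rw [h, hlen]
      · exact absurd (hnf ss1 hm1 hl1) hne1
    rw [hrL, PySem.List.slice_to cs (b := (cs.length : Int)) (by omega)]
    simp only [Int.toNat_natCast, List.take_length]
    by_cases hemp : seqs.isEmpty
    · rw [hemp]; simp [hcs]
    · rw [Bool.not_eq_true] at hemp
      rw [hemp]
      simp only [Bool.false_eq_true, if_false, String.toList_ofList]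
      exact (pvCutGo_none seqs cs hall cs.length 0 (by omega)).symm
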